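-- pv_equiv track=rewrite | github.com/dreierpawel/IronPythonRVT | F0-05-RenameViewsAndSheets.py | replace_duplicates_items
-- ===== SOURCE A (Python) =====
-- from collections import defaultdict
--
-- def list_duplicates(source_List):
--     tally = defaultdict(list)
--     for i, item in enumerate(source_List):
--         tally[item].append(i)
--     return ((key, locs) for key, locs in tally.items() if len(locs) > 1)
--
-- def get_duplicates_and_index(source_list):
--     output = []
--     for duplicate in sorted(list_duplicates(source_list)):
--         output.append(duplicate)
--     return output
--
-- def add_duplicate_info_txt(source_list, added_txt = "COPY NR "):
--     output = []
--     for s in source_list: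
--         s = str(s)
--         s = added_txt + s
--         output.append(s)
--     return output
--
-- def replace_duplicates_items(source):
--     duplicates_and_index_list = get_duplicates_and_index(source)
--     for i, elem in enumerate(duplicates_and_index_list):
--         duplicate_item = elem[0]
--         duplicate_indexes = elem[1]
--         count_duplicates = len(duplicate_indexes)
--         duplicates_range_list = list(range(1, count_duplicates + 1))
--         duplicates_txt = add_duplicate_info_txt(duplicates_range_list)
--         for d, z  in zip(duplicates_txt, duplicate_indexes):
--             d = str(d) + "__" + str(duplicate_item)
--             source[z] = d
--     return source
-- ===== SOURCE B (Python) =====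
-- # Same return value as A; also mutates `source` in place like A (via source[:] = out).
-- def replace_duplicates_items(source):
--     counts = {}
--     for s in source:
--         counts[s] = counts.get(s, 0) + 1
--     seen = {}
--     out = []
--     for s in source:
--         if counts[s] > 1:
--             c = seen.get(s, 0) + 1
--             seen[s] = c
--             out.append("COPY NR " + str(c) + "__" + s)
--         else:
--             out.append(s)
--     source[:] = out
--     return source
-- ===== Notes on version B (the rewrite author's own statement) =====
-- stated objective: simpler
-- what changed: Replaces A's index-table pipeline (defaultdict of index lists, sorted key groups, then grouped writes back into the list) with one counting pass followed by one left-to-right pass that tags each duplicate using a running per-key counter; no sort and no index grouping.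
import Mathlib
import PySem

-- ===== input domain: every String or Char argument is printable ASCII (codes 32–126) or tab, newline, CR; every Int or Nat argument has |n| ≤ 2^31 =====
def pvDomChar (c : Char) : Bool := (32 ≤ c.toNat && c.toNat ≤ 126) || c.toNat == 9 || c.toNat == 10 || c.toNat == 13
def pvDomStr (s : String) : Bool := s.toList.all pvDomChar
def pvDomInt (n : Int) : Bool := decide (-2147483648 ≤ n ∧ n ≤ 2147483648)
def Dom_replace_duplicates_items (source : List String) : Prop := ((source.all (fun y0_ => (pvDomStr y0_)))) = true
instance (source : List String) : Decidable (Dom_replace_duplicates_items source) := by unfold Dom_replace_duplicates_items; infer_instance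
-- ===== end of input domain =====

-- B replaces A's index-table (defaultdict of index lists + sort + grouped writes) with one
-- counting pass and one tagging pass with a running per-key counter; return values agree
-- (both Pythons also mutate `source` in place).

-- ===== PORT A =====
-- list_duplicates + the 'len(locs) > 1' filter (the generator is consumed only by sorted below)
def pvTallyA (source : List String) : PySem.Dict String (List Int) :=
  (PySem.List.enumerate source 0).foldl (fun d p => d.modify p.2 [] (· ++ [p.1])) PySem.Dict.empty

def pvListDuplicates (source : List String) : List (String × List Int) :=
  (pvTallyA source).items.filter (fun p => 1 < p.2.length)

-- get_duplicates_and_index: Python sorts the (key, locs) tuples; the keys are the distinct dict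
-- keys, so tuple comparison never reaches the second component: sorting by the key is exact.
def pvGetDuplicatesAndIndex (source : List String) : List (String × List Int) :=
  PySem.List.sorted (pvListDuplicates source) (fun p => p.1) false

-- add_duplicate_info_txt (the explicit append loop; str(int) = PySem.Int.toStr)
def pvAddDuplicateInfoTxt (l : List Int) : List String :=
  l.foldl (fun out n => out ++ ["COPY NR " ++ PySem.Int.toStr n]) []

def replace_duplicates_items (source : List String) : List String :=
  (pvGetDuplicatesAndIndex source).foldl (fun src elem =>
    let txts := pvAddDuplicateInfoTxt (PySem.List.pyRange 1 ((elem.2.length : Int) + 1) 1)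
    -- source[z] = d : z comes from enumerate, hence a nonnegative in-range index; List.set is exact
    (txts.zip elem.2).foldl (fun src p => src.set p.2.toNat (p.1 ++ "__" ++ elem.1)) src) source

-- ===== PORT B =====
def replace_duplicates_items_alt (source : List String) : List String :=
  let counts : PySem.Dict String Int := source.foldl (fun d s => d.insert s (d.getD s 0 + 1)) PySem.Dict.empty
  (source.foldl (fun (st : PySem.Dict String Int × List String) s =>
      if 1 < counts.getD s 0 then
        let c := st.1.getD s 0 + 1
        (st.1.insert s c, st.2 ++ ["COPY NR " ++ PySem.Int.toStr c ++ "__" ++ s])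
      else (st.1, st.2 ++ [s])) (PySem.Dict.empty, [])).2

-- ===== PRECONDITION & SPEC =====
def Spec_replace_duplicates_items (source : List String) (out : List String) : Prop := out = replace_duplicates_items_alt source
instance (source : List String) (out : List String) : Decidable (Spec_replace_duplicates_items source out) := by unfold Spec_replace_duplicates_items; infer_instance

-- ===== CLAIM (what is proved, stated in full; the proofs are below) =====
def Claim_equal_replace_duplicates_items : Prop := ∀ (source : List String), Dom_replace_duplicates_items source → Spec_replace_duplicates_items source (replace_duplicates_items source)

-- ===== LEMMAS AND PROOFS =====

-- the common target: position m of the result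
def pvSpecV (source : List String) (m : Nat) : String :=
  match source[m]? with
  | some s =>
      if 1 < source.count s then
        "COPY NR " ++ PySem.Int.toStr (((source.take (m + 1)).count s : Nat) : Int) ++ "__" ++ s
      else s
  | none => ""

def pvSpec (source : List String) : List String :=
  (List.range source.length).map (pvSpecV source)

-- occurrence positions of k in source (what pvTallyA stores under k)
def pvPosns (k : String) (source : List String) : List Int :=
  ((PySem.List.enumerate source 0).filter (fun p => p.2 == k)).map (·.1)

theorem pvSpec_getElem? (source : List String) (m : Nat) (hm : m < source.length) :
    (pvSpec source)[m]? = some (pvSpecV source m) := by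
  simp [pvSpec, hm]

-- ---- B = pvSpec ----

theorem pvB_counts (source : List String) (s : String) :
    (source.foldl (fun d t => d.insert t (d.getD t 0 + 1)) PySem.Dict.empty).getD s 0
      = (source.count s : Int) := by
  rw [PySem.Dict.foldl_insert_getD_add_one_eq_counter, PySem.Dict.getD_counter]

theorem pvB_invariant (source : List String) :
    ∀ (rest pre : List String) (seen : PySem.Dict String Int),
      source = pre ++ rest →
      (∀ k, 1 < source.count k → seen.getD k 0 = (pre.count k : Int)) →
      (rest.foldl (fun (st : PySem.Dict String Int × List String) s =>
          if 1 < ((source.count s : Nat) : Int) then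
            (st.1.insert s (st.1.getD s 0 + 1),
             st.2 ++ ["COPY NR " ++ PySem.Int.toStr (st.1.getD s 0 + 1) ++ "__" ++ s])
          else (st.1, st.2 ++ [s]))
        (seen, (List.range pre.length).map (pvSpecV source))).2
      = pvSpec source := by
  intro rest
  induction rest with
  | nil =>
      intro pre seen hsrc _
      simp [List.foldl_nil, pvSpec, hsrc]
  | cons s rest' ih =>
      intro pre seen hsrc hseen
      rw [List.foldl_cons]
      have hget : source[pre.length]? = some s := by
        rw [hsrc]; simp
      have htake : source.take (pre.length + 1) = pre ++ [s] := by
        rw [hsrc]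
        have : pre.length + 1 = pre.length + 1 := rfl
        rw [List.take_append]
        simp
      by_cases hdup : 1 < source.count s
      · have hguard : (1 : Int) < ((source.count s : Nat) : Int) := by exact_mod_cast hdup
        rw [if_pos hguard]
        have hseen_s : seen.getD s 0 = (pre.count s : Int) := hseen s hdup
        have hval : pvSpecV source pre.length
            = "COPY NR " ++ PySem.Int.toStr (seen.getD s 0 + 1) ++ "__" ++ s := by
          unfold pvSpecV
          rw [hget]
          simp only [hdup, if_true, htake, hseen_s]
          rw [List.count_append]
          push_cast
          simp
        have hout : ((List.range pre.length).map (pvSpecV source))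
              ++ ["COPY NR " ++ PySem.Int.toStr (seen.getD s 0 + 1) ++ "__" ++ s]
            = (List.range (pre ++ [s]).length).map (pvSpecV source) := by
          simp only [List.length_append, List.length_singleton, List.range_succ, List.map_append,
            List.map_cons, List.map_nil]
          rw [← hval]
        have := ih (pre ++ [s]) (seen.insert s (seen.getD s 0 + 1))
          (by rw [hsrc]; simp)
          (by
            intro k hk
            rw [PySem.Dict.getD_insert]
            by_cases hks : k = s
            · subst hks
              rw [if_pos rfl, hseen_s, List.count_append]
              push_cast; simp
            · rw [if_neg hks, hseen k hk, List.count_append]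
              simp [Ne.symm hks])
        rw [hout]
        exact this
      · have hguard : ¬ (1 : Int) < ((source.count s : Nat) : Int) := by exact_mod_cast hdup
        rw [if_neg hguard]
        have hval : pvSpecV source pre.length = s := by
          unfold pvSpecV
          rw [hget]
          simp [hdup]
        have hout : ((List.range pre.length).map (pvSpecV source)) ++ [s]
            = (List.range (pre ++ [s]).length).map (pvSpecV source) := by
          simp only [List.length_append, List.length_singleton, List.range_succ, List.map_append,
            List.map_cons, List.map_nil]
          rw [← hval]
        have := ih (pre ++ [s]) seen
          (by rw [hsrc]; simp)
          (by
            intro k hk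
            rw [hseen k hk, List.count_append]
            have hks : k ≠ s := by rintro rfl; exact hdup hk
            simp [Ne.symm hks])
        rw [hout]
        exact this

theorem pvB_eq_spec (source : List String) :
    replace_duplicates_items_alt source = pvSpec source := by
  unfold replace_duplicates_items_alt
  have hfun : (fun (st : PySem.Dict String Int × List String) s =>
      if 1 < ((source.foldl (fun (d : PySem.Dict String Int) t => d.insert t (d.getD t 0 + 1)) PySem.Dict.empty).getD s 0) then
        (st.1.insert s (st.1.getD s 0 + 1),
         st.2 ++ ["COPY NR " ++ PySem.Int.toStr (st.1.getD s 0 + 1) ++ "__" ++ s])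
      else (st.1, st.2 ++ [s]))
      = (fun (st : PySem.Dict String Int × List String) s =>
      if 1 < ((source.count s : Nat) : Int) then
        (st.1.insert s (st.1.getD s 0 + 1),
         st.2 ++ ["COPY NR " ++ PySem.Int.toStr (st.1.getD s 0 + 1) ++ "__" ++ s])
      else (st.1, st.2 ++ [s])) := by
    funext st s
    rw [pvB_counts]
  show (source.foldl _ (PySem.Dict.empty, ([] : List String))).2 = pvSpec source
  rw [hfun]
  have := pvB_invariant source source [] PySem.Dict.empty (by simp) (by intro k _; simp)
  simpa using this

-- ---- A = pvSpec ----

theorem pvSpec_getElem?_none (source : List String) (m : Nat) (hm : ¬ m < source.length) :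
    (pvSpec source)[m]? = none := by
  rw [List.getElem?_eq_none]
  simpa [pvSpec] using (by omega : source.length ≤ m)



theorem pvTallyA_getD (source : List String) (k : String) :
    (pvTallyA source).getD k [] = pvPosns k source := by
  unfold pvTallyA pvPosns
  rw [show (PySem.List.enumerate source 0).foldl (fun (d : PySem.Dict String (List Int)) (p : Int × String) => d.modify p.2 [] (· ++ [p.1])) PySem.Dict.empty
      = ((PySem.List.enumerate source 0).map (fun p => (p.2, p.1))).foldl (fun (d : PySem.Dict String (List Int)) q => d.modify q.1 [] (· ++ [q.2])) PySem.Dict.empty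
      from (List.foldl_map (f := fun (p : Int × String) => (p.2, p.1)) (g := fun (d : PySem.Dict String (List Int)) q => d.modify q.1 [] (· ++ [q.2]))).symm]
  rw [PySem.Dict.getD_foldl_modify_append]
  rw [List.filter_map, List.map_map]
  simp [Function.comp_def]

theorem pvTallyA_keys (source : List String) :
    (pvTallyA source).keys = PySem.Set.ofList source := by
  unfold pvTallyA
  rw [PySem.Dict.keys_foldl_modify_key (key := fun (p : Int × String) => p.2)
      (f := fun _ p => (· ++ [p.1])) (d0 := []) (d := PySem.Dict.empty)]
  rw [PySem.List.map_snd_enumerate]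
  simp [PySem.Dict.keys_empty, PySem.Set.update_nil_left]

theorem pvTallyA_keys_nodup (source : List String) :
    (pvTallyA source).keys.Nodup := by
  rw [pvTallyA_keys]
  exact PySem.Set.nodup_ofList source

def pvDupKeys (source : List String) : List String :=
  (PySem.Set.ofList source).filter (fun k => 1 < (pvPosns k source).length)

theorem pvListDuplicates_eq (source : List String) :
    pvListDuplicates source = (pvDupKeys source).map (fun k => (k, pvPosns k source)) := by
  unfold pvListDuplicates pvDupKeys
  rw [PySem.Dict.items_eq_map_keys (pvTallyA source) (pvTallyA_keys_nodup source) []]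
  rw [List.filter_map, pvTallyA_keys]
  congr 1
  · funext k
    rw [pvTallyA_getD]
  · apply List.filter_congr
    intro k _
    simp [pvTallyA_getD]

theorem pvPosnsFrom_mem (k : String) :
    ∀ (src : List String) (s : Int) (i : Int),
      i ∈ ((PySem.List.enumerate src s).filter (fun p => p.2 == k)).map (·.1) →
      ∃ m : Nat, i = s + m ∧ m < src.length ∧ src[m]? = some k := by
  intro src s i hi
  simp only [List.mem_map, List.mem_filter] at hi
  obtain ⟨p, ⟨hpmem, hpk⟩, hpi⟩ := hi
  rw [PySem.List.mem_enumerate_iff] at hpmem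
  obtain ⟨m, hm, rfl⟩ := hpmem
  refine ⟨m, ?_, hm, ?_⟩
  · simpa using hpi.symm
  · simp only [beq_iff_eq] at hpk
    simp [List.getElem?_eq_getElem hm, ← hpk]

theorem pvPosnsFrom_pairwise (k : String) (src : List String) (s : Int) :
    (((PySem.List.enumerate src s).filter (fun p => p.2 == k)).map (·.1)).Pairwise (· < ·) := by
  have h1 := PySem.List.pairwise_lt_enumerate src s
  exact (h1.filter _).map _ (fun a b h => h)

theorem pvPosns_nodup (k : String) (src : List String) :
    (pvPosns k src).Nodup :=
  (pvPosnsFrom_pairwise k src 0).imp ne_of_lt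

theorem pvPosnsFrom_length (k : String) :
    ∀ (src : List String) (s : Int),
      (((PySem.List.enumerate src s).filter (fun p => p.2 == k)).map (·.1)).length = src.count k := by
  intro src
  induction src with
  | nil => intro s; simp [PySem.List.enumerate_nil]
  | cons x t ih =>
      intro s
      rw [PySem.List.enumerate_cons, List.filter_cons, List.count_cons]
      by_cases hxk : x = k
      · simp [hxk, ih]
      · simp [hxk, ih]

theorem pvPosns_length (k : String) (src : List String) :
    (pvPosns k src).length = src.count k := pvPosnsFrom_length k src 0

theorem pvPosnsFrom_rank (k : String) :
    ∀ (src : List String) (s : Int) (j : Nat) (i : Int),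
      (((PySem.List.enumerate src s).filter (fun p => p.2 == k)).map (·.1))[j]? = some i →
      ∃ m : Nat, i = s + m ∧ m < src.length ∧ src[m]? = some k ∧
        (src.take (m + 1)).count k = j + 1 := by
  intro src
  induction src with
  | nil => intro s j i h; simp [PySem.List.enumerate_nil] at h
  | cons x t ih =>
      intro s j i h
      rw [PySem.List.enumerate_cons, List.filter_cons] at h
      by_cases hxk : x = k
      · subst hxk
        rw [if_pos (by simp)] at h
        rw [List.map_cons] at h
        cases j with
        | zero =>
            simp only [List.getElem?_cons_zero, Option.some_inj] at h
            exact ⟨0, by simp [← h], by simp, by simp, by simp⟩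
        | succ j =>
            rw [List.getElem?_cons_succ] at h
            obtain ⟨m, him, hm, hgm, hcm⟩ := ih (s + 1) j i h
            refine ⟨m + 1, by omega, by simpa using hm, by simpa using hgm, ?_⟩
            simp [List.take_succ_cons, hcm]
      · rw [if_neg (by simp [hxk])] at h
        obtain ⟨m, him, hm, hgm, hcm⟩ := ih (s + 1) j i h
        refine ⟨m + 1, by omega, by simpa using hm, by simpa using hgm, ?_⟩
        simp [List.take_succ_cons, hcm, hxk]

theorem pvPosns_rank (k : String) (src : List String) (j : Nat) (i : Int)
    (h : (pvPosns k src)[j]? = some i) :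
    ∃ m : Nat, i = (m : Int) ∧ m < src.length ∧ src[m]? = some k ∧
      (src.take (m + 1)).count k = j + 1 := by
  obtain ⟨m, him, hm, hgm, hcm⟩ := pvPosnsFrom_rank k src 0 j i h
  exact ⟨m, by omega, hm, hgm, hcm⟩

theorem pvPosns_mem (k : String) (src : List String) (i : Int) (hi : i ∈ pvPosns k src) :
    ∃ m : Nat, i = (m : Int) ∧ m < src.length ∧ src[m]? = some k := by
  obtain ⟨m, him, hm, hgm⟩ := pvPosnsFrom_mem k src 0 i hi
  exact ⟨m, by omega, hm, hgm⟩

theorem pvAddTxt_eq (l : List Int) :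
    pvAddDuplicateInfoTxt l = l.map (fun n => "COPY NR " ++ PySem.Int.toStr n) := by
  unfold pvAddDuplicateInfoTxt
  suffices h : ∀ (l : List Int) (acc : List String),
      l.foldl (fun out n => out ++ ["COPY NR " ++ PySem.Int.toStr n]) acc
        = acc ++ l.map (fun n => "COPY NR " ++ PySem.Int.toStr n) by
    simpa using h l []
  intro l
  induction l with
  | nil => intro acc; simp
  | cons n t ih => intro acc; simp [ih]

-- the flat list of (value, index) writes A performs
def pvWrites (source : List String) : List (String × Int) :=
  (pvGetDuplicatesAndIndex source).flatMap (fun e =>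
    ((((PySem.List.pyRange 1 ((e.2.length : Int) + 1) 1).map
        (fun n => "COPY NR " ++ PySem.Int.toStr n)).zip e.2).map
      (fun p => (p.1 ++ "__" ++ e.1, p.2))))

def pvApplyW (ws : List (String × Int)) (src : List String) : List String :=
  ws.foldl (fun src p => src.set p.2.toNat p.1) src

theorem pvFoldl_flatMap {α β γ : Type} (l : List α) (f : α → List β)
    (g : γ → β → γ) (i : γ) :
    (l.flatMap f).foldl g i = l.foldl (fun a x => (f x).foldl g a) i := by
  induction l generalizing i with
  | nil => rfl
  | cons x t ih => simp [List.flatMap_cons, List.foldl_append, ih]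

theorem pvA_eq_applyW (source : List String) :
    replace_duplicates_items source = pvApplyW (pvWrites source) source := by
  unfold replace_duplicates_items pvApplyW pvWrites
  rw [pvFoldl_flatMap]
  apply PySem.List.foldl_congr_mem
  intro src e _
  rw [pvAddTxt_eq]
  rw [List.foldl_map]

theorem pvApplyW_getElem? (ws : List (String × Int)) :
    ∀ (src : List String),
      (∀ p ∈ ws, ∃ m : Nat, p.2 = (m : Int) ∧ m < src.length) →
      (ws.map (·.2)).Nodup →
      ∀ (i : Nat),
        (pvApplyW ws src)[i]? =
          (match ws.find? (fun p => p.2 == (i : Int)) with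
           | some p => some p.1
           | none => src[i]?) := by
  induction ws with
  | nil => intro src _ _ i; simp [pvApplyW]
  | cons p t ih =>
      intro src hin hnd i
      obtain ⟨m, hpm, hmlt⟩ := hin p (by simp)
      have hstep : pvApplyW (p :: t) src = pvApplyW t (src.set m p.1) := by
        unfold pvApplyW; rw [List.foldl_cons, hpm]; simp
      rw [hstep]
      have hin' : ∀ q ∈ t, ∃ m' : Nat, q.2 = (m' : Int) ∧ m' < (src.set m p.1).length := by
        intro q hq
        obtain ⟨m', h1, h2⟩ := hin q (by simp [hq])
        exact ⟨m', h1, by simpa using h2⟩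
      have hnd' : (t.map (·.2)).Nodup := by
        simpa using hnd.sublist ((List.sublist_cons_self p t).map (·.2))
      by_cases hpi : p.2 = (i : Int)
      · have hmi : m = i := by omega
        rw [List.find?_cons_of_pos (by simp [hpi])]
        rw [ih (src.set m p.1) hin' hnd' i]
        have hnotin : ∀ q ∈ t, ¬ (q.2 == (i : Int)) = true := by
          intro q hq hqi
          have : p.2 ∈ t.map (·.2) := by
            rw [hpi, ← (by simpa using hqi : q.2 = (i : Int))]
            exact List.mem_map_of_mem hq
          simp only [List.map_cons] at hnd
          exact (List.nodup_cons.mp hnd).1 this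
        rw [List.find?_eq_none.mpr hnotin]
        rw [hmi, List.getElem?_set_self (by omega)]
      · rw [List.find?_cons_of_neg (by simpa using hpi)]
        rw [ih (src.set m p.1) hin' hnd' i]
        cases hfind : t.find? (fun p => p.2 == (i : Int)) with
        | some q => rfl
        | none =>
            simp only []
            apply List.getElem?_set_ne
            omega

theorem pvFind?_of_mem_nodup (ws : List (String × Int)) (v : String) (z : Int)
    (hnd : (ws.map (·.2)).Nodup) (hmem : (v, z) ∈ ws) :
    ws.find? (fun p => p.2 == z) = some (v, z) := by
  induction ws with
  | nil => simp at hmem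
  | cons p t ih =>
      by_cases hpz : p.2 = z
      · rw [List.find?_cons_of_pos (by simp [hpz])]
        rcases List.mem_cons.mp hmem with h | h
        · rw [h]
        · exfalso
          have : p.2 ∈ t.map (·.2) := by
            rw [hpz]
            have : (v, z).2 ∈ t.map (·.2) := List.mem_map_of_mem h
            simpa using this
          simp only [List.map_cons] at hnd
          exact (List.nodup_cons.mp hnd).1 this
      · rw [List.find?_cons_of_neg (by simpa using hpz)]
        rcases List.mem_cons.mp hmem with h | h
        · exact absurd (by rw [← h]) hpz
        · exact ih (by simpa using (List.nodup_cons.mp (by simpa using hnd)).2) h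

theorem pvSorted_perm (source : List String) :
    (pvGetDuplicatesAndIndex source).Perm (pvListDuplicates source) := by
  unfold pvGetDuplicatesAndIndex
  exact PySem.List.sorted_perm _ _ _

theorem pvDupKeys_nodup (source : List String) : (pvDupKeys source).Nodup :=
  (PySem.Set.nodup_ofList source).filter _

theorem pvMem_dups (source : List String) (e : String × List Int)
    (he : e ∈ pvGetDuplicatesAndIndex source) :
    ∃ k, e = (k, pvPosns k source) ∧ 1 < (pvPosns k source).length ∧ k ∈ source := by
  have := (pvSorted_perm source).mem_iff.mp he
  rw [pvListDuplicates_eq] at this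
  obtain ⟨k, hk, rfl⟩ := List.mem_map.mp this
  unfold pvDupKeys at hk
  have hk' := List.mem_filter.mp hk
  refine ⟨k, rfl, by simpa using hk'.2, ?_⟩
  exact (PySem.Set.mem_ofList source k).mp hk'.1

-- every write targets a duplicate position, with the tagged value
theorem pvWrites_mem (source : List String) (p : String × Int) (hp : p ∈ pvWrites source) :
    ∃ (m : Nat) (k : String), p.2 = (m : Int) ∧ m < source.length ∧ source[m]? = some k ∧
      1 < source.count k ∧
      p.1 = "COPY NR " ++ PySem.Int.toStr (((source.take (m + 1)).count k : Nat) : Int) ++ "__" ++ k := by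
  unfold pvWrites at hp
  obtain ⟨e, he, hpe⟩ := List.mem_flatMap.mp hp
  obtain ⟨k, rfl, hlen, hksrc⟩ := pvMem_dups source e he
  obtain ⟨q, hq, rfl⟩ := List.mem_map.mp hpe
  -- q ∈ txts.zip (pvPosns k source)
  obtain ⟨j, hj⟩ := List.mem_iff_getElem?.mp hq
  rw [List.getElem?_zip_eq_some] at hj
  obtain ⟨htj, hlj⟩ := hj
  obtain ⟨m, him, hm, hgm, hcm⟩ := pvPosns_rank k source j q.2 hlj
  rw [List.getElem?_map] at htj
  obtain ⟨hjlt, -⟩ := List.getElem?_eq_some_iff.mp hlj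
  rw [PySem.List.getElem?_pyRange_one] at htj
  refine ⟨m, k, him, hm, hgm, ?_, ?_⟩
  · rw [← pvPosns_length k source]; exact hlen
  · have hjlt' : j < (pvPosns k source).length := by simpa using hjlt
    have hcond : j < ((((pvPosns k source).length : Int) + 1) - 1).toNat := by omega
    rw [if_pos hcond] at htj
    have hq1 : q.1 = "COPY NR " ++ PySem.Int.toStr (1 + (j : Int)) := by
      simpa using htj.symm
    have hcast : (((source.take (m + 1)).count k : Nat) : Int) = 1 + (j : Int) := by
      rw [hcm]; push_cast; ring
    rw [hq1, hcast]

theorem pvWrites_map_snd (source : List String) :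
    (pvWrites source).map (·.2) = (pvGetDuplicatesAndIndex source).flatMap (·.2) := by
  unfold pvWrites
  rw [List.map_flatMap]
  congr 1
  funext e
  rw [List.map_map]
  have : ((fun (x : String × Int) => x.2) ∘ fun p => (p.1 ++ "__" ++ e.1, p.2))
      = (fun (x : String × Int) => x.2) := rfl
  rw [this]
  apply List.map_snd_zip
  simp [PySem.List.length_pyRange_one]

theorem pvWrites_snd_nodup (source : List String) :
    ((pvWrites source).map (·.2)).Nodup := by
  rw [pvWrites_map_snd]
  rw [List.nodup_flatMap]
  constructor
  · intro e he
    obtain ⟨k, rfl, -, -⟩ := pvMem_dups source e he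
    exact pvPosns_nodup k source
  · have hsym : Symmetric (Function.onFun List.Disjoint (fun (e : String × List Int) => e.2)) := by
      intro a b h
      exact (List.disjoint_symm h)
    refine ((pvSorted_perm source).pairwise_iff (fun h => hsym h)).mpr ?_
    rw [pvListDuplicates_eq]
    rw [List.pairwise_map]
    apply List.Pairwise.imp_of_mem (R := (· ≠ ·))
    · intro k k' hk hk' hne i hi hi'
      obtain ⟨m, rfl, hm, hgm⟩ := pvPosns_mem k source i hi
      obtain ⟨m', hmm', hm', hgm'⟩ := pvPosns_mem k' source _ hi'
      have : m = m' := by exact_mod_cast hmm'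
      subst this
      rw [hgm] at hgm'
      exact hne (Option.some_inj.mp hgm')
    · exact (pvDupKeys_nodup source)

theorem pvWrites_mem_of_dup (source : List String) (m : Nat) (k : String)
    (hgm : source[m]? = some k) (hdup : 1 < source.count k) :
    ("COPY NR " ++ PySem.Int.toStr (((source.take (m + 1)).count k : Nat) : Int) ++ "__" ++ k,
      (m : Int)) ∈ pvWrites source := by
  have hm : m < source.length := by
    by_contra h
    simp [List.getElem?_eq_none (by omega : source.length ≤ m)] at hgm
  have hkmem : k ∈ source := by
    have := List.getElem?_eq_some_iff.mp hgm
    obtain ⟨h, rfl⟩ := this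
    exact List.getElem_mem h
  have hlen : 1 < (pvPosns k source).length := by
    rw [pvPosns_length]; exact hdup
  have hkd : k ∈ pvDupKeys source := by
    unfold pvDupKeys
    rw [List.mem_filter]
    exact ⟨(PySem.Set.mem_ofList source k).mpr hkmem, by simpa using hlen⟩
  have he : (k, pvPosns k source) ∈ pvGetDuplicatesAndIndex source := by
    rw [(pvSorted_perm source).mem_iff, pvListDuplicates_eq]
    exact List.mem_map_of_mem hkd
  have hipos : (m : Int) ∈ pvPosns k source := by
    unfold pvPosns
    rw [List.mem_map]
    refine ⟨((m : Int), k), ?_, rfl⟩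
    rw [List.mem_filter]
    constructor
    · rw [PySem.List.mem_enumerate_iff]
      obtain ⟨h, hv⟩ := List.getElem?_eq_some_iff.mp hgm
      exact ⟨m, h, by simp [hv]⟩
    · simp
  obtain ⟨j, hj⟩ := List.mem_iff_getElem?.mp hipos
  obtain ⟨m', hmm', hm', hgm', hcm'⟩ := pvPosns_rank k source j (m : Int) hj
  have hmm : m' = m := by exact_mod_cast hmm'.symm
  rw [hmm] at hcm'
  obtain ⟨hjlt, -⟩ := List.getElem?_eq_some_iff.mp hj
  unfold pvWrites
  rw [List.mem_flatMap]
  refine ⟨(k, pvPosns k source), he, ?_⟩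
  rw [List.mem_map]
  refine ⟨("COPY NR " ++ PySem.Int.toStr (1 + (j : Int)), (m : Int)), ?_, ?_⟩
  · rw [List.mem_iff_getElem?]
    refine ⟨j, ?_⟩
    rw [List.getElem?_zip_eq_some]
    refine ⟨?_, by simpa using hj⟩
    rw [List.getElem?_map, PySem.List.getElem?_pyRange_one]
    rw [if_pos (by simp only [] at hjlt ⊢; omega)]
    simp
  · have hcast : (((source.take (m + 1)).count k : Nat) : Int) = 1 + (j : Int) := by
      rw [hcm']; push_cast; ring
    rw [hcast]

theorem pvA_eq_spec (source : List String) :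
    replace_duplicates_items source = pvSpec source := by
  rw [pvA_eq_applyW]
  have hin : ∀ p ∈ pvWrites source, ∃ m : Nat, p.2 = (m : Int) ∧ m < source.length := by
    intro p hp
    obtain ⟨m, k, h1, h2, -⟩ := pvWrites_mem source p hp
    exact ⟨m, h1, h2⟩
  apply List.ext_getElem?
  intro i
  rw [pvApplyW_getElem? (pvWrites source) source hin (pvWrites_snd_nodup source) i]
  by_cases hi : i < source.length
  · obtain ⟨s, hs⟩ : ∃ s, source[i]? = some s :=
      ⟨source[i], List.getElem?_eq_getElem hi⟩
    rw [pvSpec_getElem? source i hi]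
    by_cases hdup : 1 < source.count s
    · have hmem := pvWrites_mem_of_dup source i s hs hdup
      rw [pvFind?_of_mem_nodup (pvWrites source) _ _ (pvWrites_snd_nodup source) hmem]
      unfold pvSpecV
      rw [hs]
      simp [hdup]
    · have hnone : (pvWrites source).find? (fun p => p.2 == (i : Int)) = none := by
        rw [List.find?_eq_none]
        intro p hp hbeq
        obtain ⟨m, k, h1, hmlt, hgk, hck, -⟩ := pvWrites_mem source p hp
        have him : p.2 = (i : Int) := by simpa using hbeq
        have hmi : m = i := by rw [h1] at him; exact_mod_cast him
        rw [hmi, hs] at hgk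
        exact hdup (Option.some_inj.mp hgk ▸ hck)
      rw [hnone, hs]
      unfold pvSpecV
      rw [hs]
      simp [hdup]
  · rw [pvSpec_getElem?_none source i hi]
    cases hfind : (pvWrites source).find? (fun p => p.2 == (i : Int)) with
    | some p =>
        exfalso
        have hpmem := List.mem_of_find?_eq_some hfind
        obtain ⟨m, -, h1, hmlt⟩ : ∃ m : Nat, True ∧ p.2 = (m : Int) ∧ m < source.length := by
          obtain ⟨m, h1, h2⟩ := hin p hpmem
          exact ⟨m, trivial, h1, h2⟩
        have hbeq := List.find?_some hfind
        have : p.2 = (i : Int) := by simpa using hbeq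
        rw [h1] at this
        have : m = i := by exact_mod_cast this
        omega
    | none =>
        rw [List.getElem?_eq_none (by omega)]

-- ===== VERDICT (by name: the statement is the Claim_ definition above) =====
theorem replace_duplicates_items_spec : Claim_equal_replace_duplicates_items := by
  intro source _
  unfold Spec_replace_duplicates_items
  rw [pvA_eq_spec, pvB_eq_spec]
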